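-- pv_equiv track=rewrite | github.com/antoinefalisse/upper-imu-dc | variousFunctions.py | getMomentArmIndices
-- ===== SOURCE A (Python) =====
-- def getMomentArmIndices(muscles, polynomialJoints, polynomialData):
--
--     momentArmIndices = {}
--     for count, muscle in enumerate(muscles):
--         spanning = polynomialData[muscle]['spanning']
--         for i in range(len(spanning)):
--             if (spanning[i] == 1):
--                 momentArmIndices.setdefault(
--                         polynomialJoints[i], []).append(count)
--
--     return momentArmIndices
-- ===== SOURCE B (Python) =====
-- def getMomentArmIndices(muscles, polynomialJoints, polynomialData):
--     # Flatten to (joint, muscle-index) events, then group by joint in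
--     # first-occurrence order (no incremental setdefault dict building).
--     events = [(polynomialJoints[i], count)
--               for count, muscle in enumerate(muscles)
--               for i, flag in enumerate(polynomialData[muscle]['spanning'])
--               if flag == 1]
--     return {joint: [c for j, c in events if j == joint]
--             for joint in dict.fromkeys(j for j, _ in events)}
-- ===== Notes on version B (the rewrite author's own statement) =====
-- stated objective: alternative
-- what changed: Instead of incrementally building the dict with setdefault/append inside nested loops, B flattens the input to a list of (joint, muscle-index) events and then builds the result as a group-by: the keys are the first-occurrence-ordered distinct joints of the event list and each value is a filter of the events.
import Mathlib
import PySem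

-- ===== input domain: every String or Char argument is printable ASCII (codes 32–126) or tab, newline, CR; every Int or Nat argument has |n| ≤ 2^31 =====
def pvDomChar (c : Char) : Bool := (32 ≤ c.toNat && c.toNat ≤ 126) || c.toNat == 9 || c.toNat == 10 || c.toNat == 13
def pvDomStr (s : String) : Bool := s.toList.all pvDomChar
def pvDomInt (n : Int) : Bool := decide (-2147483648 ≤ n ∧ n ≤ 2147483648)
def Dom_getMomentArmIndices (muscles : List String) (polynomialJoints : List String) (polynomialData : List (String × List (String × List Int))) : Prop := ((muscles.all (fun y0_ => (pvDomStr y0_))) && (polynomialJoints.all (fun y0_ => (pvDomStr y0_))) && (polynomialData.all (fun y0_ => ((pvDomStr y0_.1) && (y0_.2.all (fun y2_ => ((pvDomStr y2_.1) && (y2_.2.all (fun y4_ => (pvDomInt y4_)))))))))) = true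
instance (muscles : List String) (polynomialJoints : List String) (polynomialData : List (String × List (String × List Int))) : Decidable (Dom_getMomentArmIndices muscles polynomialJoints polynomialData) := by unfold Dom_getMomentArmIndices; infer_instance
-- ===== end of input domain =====

-- B replaces A's incremental setdefault/append dict building with a flatten-to-events pass
-- followed by a group-by over first-occurrence-ordered distinct joints (alternative decomposition).


-- ===== PORT A =====
-- polynomialData[muscle]['spanning'] (Pre_ guarantees both keys are present; outside Pre_ the
-- defaults are never relied on — both Pythons raise there)
def pvSpan (polynomialData : List (String × List (String × List Int))) (muscle : String) : List Int :=
  (PySem.Dict.mk ((PySem.Dict.mk polynomialData).getD muscle [])).getD "spanning" []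

def getMomentArmIndices (muscles : List String) (polynomialJoints : List String) (polynomialData : List (String × List (String × List Int))) : List (String × List Int) :=
  ((PySem.List.enumerate muscles 0).foldl (fun d p =>
      let spanning := pvSpan polynomialData p.2
      (PySem.List.pyRange 0 (spanning.length : Int) 1).foldl (fun d i =>
        if PySem.List.pyGetD spanning i 0 == 1 then
          d.modify (PySem.List.pyGetD polynomialJoints i "") [] (fun v => v ++ [p.1])
        else d) d)
    PySem.Dict.empty).items

-- ===== PORT B =====
def pvEvents (muscles : List String) (polynomialJoints : List String) (polynomialData : List (String × List (String × List Int))) : List (String × Int) :=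
  (PySem.List.enumerate muscles 0).flatMap (fun p =>
    (PySem.List.enumerate (pvSpan polynomialData p.2) 0).filterMap (fun q =>
      if q.2 == 1 then some (PySem.List.pyGetD polynomialJoints q.1 "", p.1) else none))

def getMomentArmIndices_alt (muscles : List String) (polynomialJoints : List String) (polynomialData : List (String × List (String × List Int))) : List (String × List Int) :=
  let events := pvEvents muscles polynomialJoints polynomialData
  (PySem.List.dedup (events.map (·.1))).map
    (fun j => (j, (events.filter (fun e => e.1 == j)).map (·.2)))

-- ===== PRECONDITION & SPEC =====
-- spanOf pd m = polynomialData[m]['spanning'] as an Option (none = KeyError)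
def spanOf (polynomialData : List (String × List (String × List Int))) (m : String) : Option (List Int) :=
  ((PySem.Dict.mk polynomialData).get? m).bind (fun inn => (PySem.Dict.mk inn).get? "spanning")

-- Pre_ excludes exactly the inputs on which the Python raises: a muscle missing from
-- polynomialData or without a 'spanning' entry (KeyError), or a spanning flag 1 at an index
-- with no corresponding joint in polynomialJoints (IndexError).
def Pre_getMomentArmIndices (muscles : List String) (polynomialJoints : List String) (polynomialData : List (String × List (String × List Int))) : Prop :=
  ∀ m ∈ muscles, ((spanOf polynomialData m).map (fun sp =>
    (PySem.List.enumerate sp 0).all (fun q => !(q.2 == 1) || decide (q.1 < (polynomialJoints.length : Int))))).getD false = true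
instance (muscles : List String) (polynomialJoints : List String) (polynomialData : List (String × List (String × List Int))) : Decidable (Pre_getMomentArmIndices muscles polynomialJoints polynomialData) := by unfold Pre_getMomentArmIndices; infer_instance

def pvWitness_getMomentArmIndices : List String × List String × (List (String × List (String × List Int))) :=
  (["m1", "m2"], ["hip", "knee"], [("m1", [("spanning", [1, 0])]), ("m2", [("spanning", [1, 1])])])

def Spec_getMomentArmIndices (muscles : List String) (polynomialJoints : List String) (polynomialData : List (String × List (String × List Int))) (out : List (String × List Int)) : Prop := out = getMomentArmIndices_alt muscles polynomialJoints polynomialData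
instance (muscles : List String) (polynomialJoints : List String) (polynomialData : List (String × List (String × List Int))) (out : List (String × List Int)) : Decidable (Spec_getMomentArmIndices muscles polynomialJoints polynomialData out) := by unfold Spec_getMomentArmIndices; infer_instance

-- ===== CLAIM (what is proved, stated in full; the proofs are below) =====
def Claim_equal_getMomentArmIndices : Prop := ∀ (muscles : List String) (polynomialJoints : List String) (polynomialData : List (String × List (String × List Int))), Dom_getMomentArmIndices muscles polynomialJoints polynomialData → Pre_getMomentArmIndices muscles polynomialJoints polynomialData → Spec_getMomentArmIndices muscles polynomialJoints polynomialData (getMomentArmIndices muscles polynomialJoints polynomialData)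

-- ===== LEMMAS AND PROOFS =====

-- A's inner loop over range(len(spanning)) equals the fold of the grouping step over the
-- event list of that muscle.
theorem inner_eq_events (sp : List Int) (pj : List String) (c : Int) (d : PySem.Dict String (List Int)) :
    (PySem.List.pyRange 0 (sp.length : Int) 1).foldl (fun d i =>
        if PySem.List.pyGetD sp i 0 == 1 then
          d.modify (PySem.List.pyGetD pj i "") [] (fun v => v ++ [c])
        else d) d
      = ((PySem.List.enumerate sp 0).filterMap (fun q =>
          if q.2 == 1 then some (PySem.List.pyGetD pj q.1 "", c) else none)).foldl
          (fun d e => d.modify e.1 [] (fun v => v ++ [e.2])) d := by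
  rw [List.foldl_filterMap, PySem.List.enumerate_eq_map_pyRange (d := 0), List.foldl_map]
  apply PySem.List.foldl_congr_mem
  intro d i _
  by_cases h : PySem.List.pyGetD sp i 0 == 1 <;> simp [h]

-- A's whole nested loop is the grouping fold over the flattened event list.
theorem foldA_eq_foldl_events (muscles : List String) (pj : List String) (pd : List (String × List (String × List Int))) :
    (PySem.List.enumerate muscles 0).foldl (fun d p =>
        let spanning := pvSpan pd p.2
        (PySem.List.pyRange 0 (spanning.length : Int) 1).foldl (fun d i =>
          if PySem.List.pyGetD spanning i 0 == 1 then
            d.modify (PySem.List.pyGetD pj i "") [] (fun v => v ++ [p.1])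
          else d) d)
      PySem.Dict.empty
      = (pvEvents muscles pj pd).foldl (fun d e => d.modify e.1 [] (fun v => v ++ [e.2])) PySem.Dict.empty := by
  rw [pvEvents, List.foldl_flatMap]
  apply PySem.List.foldl_congr_mem
  intro d p _
  exact inner_eq_events (pvSpan pd p.2) pj p.1 d

-- ===== VERDICT (by name: the statement is the Claim_ definition above) =====
theorem getMomentArmIndices_spec : Claim_equal_getMomentArmIndices := by
  unfold Claim_equal_getMomentArmIndices
  intro muscles pj pd _ _
  unfold Spec_getMomentArmIndices getMomentArmIndices getMomentArmIndices_alt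
  rw [foldA_eq_foldl_events]
  set ev := pvEvents muscles pj pd with hev
  have hnd : ((ev.foldl (fun d e => d.modify e.1 [] (fun v => v ++ [e.2])) PySem.Dict.empty).keys).Nodup := by
    exact PySem.Dict.nodup_keys_foldl_modify_key ev Prod.fst [] (fun _ e => (fun v => v ++ [e.2])) PySem.Dict.empty (by simp)
  rw [PySem.Dict.items_eq_map_keys _ hnd []]
  have hkeys : (ev.foldl (fun d e => d.modify e.1 [] (fun v => v ++ [e.2])) PySem.Dict.empty).keys
      = PySem.List.dedup (ev.map (·.1)) := by
    rw [PySem.Dict.keys_foldl_modify_key]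
    simp [PySem.Set.update_nil_left]
  rw [hkeys]
  apply List.map_congr_left
  intro k _
  rw [PySem.Dict.getD_foldl_modify_append]
  simp
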